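-- pv_equiv track=rewrite | github.com/UnstuckDataMan/Unstuck-Internal-Dashboard | app/routers/gender.py | _detect_name_column
-- ===== SOURCE A (Python) =====
-- from typing import Optional
--
-- _NAME_CANDIDATES = [
--     "first_name", "firstname", "first", "given", "name", "first name", "given name",
-- ]
--
-- def _detect_name_column(headers: list[str]) -> Optional[str]:
--     """Deterministic first-name column detection (exact then contains match)."""
--     def norm(h: str) -> str:
--         return " ".join(str(h).strip().lower().replace("_", " ").replace("-", " ").split())
--
--     norm_map = {h: norm(h) for h in headers}
--     cand_norms = [norm(c) for c in _NAME_CANDIDATES]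
--
--     for cand in cand_norms:
--         for original, normed in norm_map.items():
--             if normed == cand:
--                 return original
--
--     for cand in cand_norms:
--         toks = cand.split()
--         for original, normed in norm_map.items():
--             parts = normed.split()
--             for i in range(len(parts) - len(toks) + 1):
--                 if parts[i : i + len(toks)] == toks:
--                     return original
--
--     return headers[0] if headers else None
-- ===== SOURCE B (Python) =====
-- from typing import Optional
--
-- _NAME_CANDIDATES = [
--     "first_name", "firstname", "first", "given", "name", "first name", "given name",
-- ]
--
-- def _detect_name_column(headers: list[str]) -> Optional[str]:
--     """Single pass: give each header a (phase, candidate-index) priority, keep the earliest best."""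
--     def norm(h: str) -> str:
--         return " ".join(str(h).strip().lower().replace("_", " ").replace("-", " ").split())
--
--     cand_norms = [norm(c) for c in _NAME_CANDIDATES]
--
--     def rank(h: str) -> tuple:
--         normed = norm(h)
--         parts = normed.split()
--         contains = None
--         for j, cand in enumerate(cand_norms):
--             if normed == cand:
--                 return (0, j)
--             if contains is None:
--                 toks = cand.split()
--                 n = len(toks)
--                 if any(parts[i:i + n] == toks for i in range(len(parts) - n + 1)):
--                     contains = (1, j)
--         return contains if contains is not None else (2, 0)
--
--     best = None
--     for h in headers:
--         r = rank(h)
--         if best is None or r < best[0]: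
--             best = (r, h)
--     return best[1] if best is not None else None
-- ===== Notes on version B (the rewrite author's own statement) =====
-- stated objective: alternative
-- what changed: Replaces A's two sequential phases of candidate-outer/header-inner scans (plus a header dict) by a single pass over the headers that computes a (phase, candidate-index) priority per header and keeps the earliest best-ranked header, with the no-match fallback to headers[0] arising as the natural all-equal-rank case.
import Mathlib
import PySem

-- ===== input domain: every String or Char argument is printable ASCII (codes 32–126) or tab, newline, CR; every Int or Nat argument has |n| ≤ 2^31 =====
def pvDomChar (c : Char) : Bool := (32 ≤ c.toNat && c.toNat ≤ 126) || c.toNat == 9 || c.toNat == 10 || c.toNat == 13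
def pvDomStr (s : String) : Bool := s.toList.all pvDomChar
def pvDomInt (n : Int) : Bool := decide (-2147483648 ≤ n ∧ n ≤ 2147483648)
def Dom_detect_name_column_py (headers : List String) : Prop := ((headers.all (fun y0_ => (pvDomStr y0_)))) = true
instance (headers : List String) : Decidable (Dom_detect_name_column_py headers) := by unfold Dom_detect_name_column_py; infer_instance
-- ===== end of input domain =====

-- B is an alternative, structurally different implementation: one pass over the headers
-- computing a (phase, candidate-index) priority per header and keeping the earliest best,
-- instead of A's two sequential candidate-outer/header-inner scan phases over a header dict.

-- ===== PORT A =====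
-- shared by both ports (both Pythons define the identical `norm` helper and the identical
-- sliding-window token test)
def nameCandidates : List String :=
  ["first_name", "firstname", "first", "given", "name", "first name", "given name"]

def pyNorm (h : String) : String :=
  PySem.Str.join " "
    (PySem.Str.split₀
      (PySem.Str.replace (PySem.Str.replace (PySem.Str.lower (PySem.Str.strip h)) "_" " ") "-" " "))

-- the inner `for i in range(len(parts) - len(toks) + 1): parts[i:i+len(toks)] == toks` loop
def containsToks (cand normed : String) : Bool :=
  let toks := PySem.Str.split₀ cand
  let parts := PySem.Str.split₀ normed
  (PySem.List.pyRange 0 ((parts.length : Int) - (toks.length : Int) + 1) 1).any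
    (fun i => PySem.List.slice parts (some i) (some (i + (toks.length : Int))) == toks)

def detect_name_column_py (headers : List String) : Option String :=
  let norm_map : PySem.Dict String String :=
    headers.foldl (fun d h => d.insert h (pyNorm h)) PySem.Dict.empty
  let cand_norms := nameCandidates.map pyNorm
  match cand_norms.findSome?
      (fun cand => (norm_map.items.find? (fun p => p.2 == cand)).map (fun p => p.1)) with
  | some original => some original
  | none =>
    match cand_norms.findSome?
        (fun cand => (norm_map.items.find? (fun p => containsToks cand p.2)).map (fun p => p.1)) with
    | some original => some original
    | none => headers.head?

-- ===== PORT B =====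
def pairLt (a b : Nat × Nat) : Bool := a.1 < b.1 || (a.1 == b.1 && a.2 < b.2)

-- the `for j, cand in enumerate(cand_norms)` loop of Source B's rank
def rankGo (normed : String) : Nat → Option (Nat × Nat) → List String → Nat × Nat
  | _, cont, [] => cont.getD (2, 0)
  | j, cont, c :: cs =>
    if normed == c then (0, j)
    else rankGo normed (j + 1)
      (if cont.isNone && containsToks c normed then some (1, j) else cont) cs

def rankOf (cand_norms : List String) (h : String) : Nat × Nat :=
  rankGo (pyNorm h) 0 none cand_norms

def detect_name_column_py_alt (headers : List String) : Option String :=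
  let cand_norms := nameCandidates.map pyNorm
  (headers.foldl
      (fun best h =>
        let r := rankOf cand_norms h
        match best with
        | none => some (r, h)
        | some b => if pairLt r b.1 then some (r, h) else some b)
      none).map (fun b => b.2)

-- ===== PRECONDITION & SPEC =====
def Spec_detect_name_column_py (headers : List String) (out : Option String) : Prop := out = detect_name_column_py_alt headers
instance (headers : List String) (out : Option String) : Decidable (Spec_detect_name_column_py headers out) := by unfold Spec_detect_name_column_py; infer_instance

-- ===== CLAIM (what is proved, stated in full; the proofs are below) =====
def Claim_equal_detect_name_column_py : Prop := ∀ (headers : List String), Dom_detect_name_column_py headers → Spec_detect_name_column_py headers (detect_name_column_py headers)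

-- ===== LEMMAS AND PROOFS =====

set_option maxHeartbeats 400000

-- abbreviations for the two match predicates and the candidate list
def pExact (c x : String) : Bool := pyNorm x == c
def pCont (c x : String) : Bool := containsToks c (pyNorm x)
def cands : List String := nameCandidates.map pyNorm

-- index of the first candidate (in cs) matched by x under p
def fIdx (p : String → String → Bool) (cs : List String) (x : String) : Option Nat :=
  List.findIdx? (fun c => p c x) cs

-- strict order on optional candidate indices (none = no match = worst)
def oLt : Option Nat → Option Nat → Bool
  | some a, some b => a < b
  | some _, none => true
  | none, _ => false

-- leftmost header minimizing g (headers with g = none excluded)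
def amO (g : String → Option Nat) : List String → Option String
  | [] => none
  | x :: xs =>
    match amO g xs with
    | none => if (g x).isSome then some x else none
    | some b => if oLt (g b) (g x) then some b else some x

-- leftmost header minimizing a total key
def amT (k : String → Nat) : List String → Option String
  | [] => none
  | x :: xs =>
    match amT k xs with
    | none => some x
    | some c => if k c < k x then some c else some x

-- combined priority of a header: exact-match index, else 7 + contains index, else 14
def kOf (x : String) : Nat :=
  match fIdx pExact cands x with
  | some j => j
  | none =>
    match fIdx pCont cands x with
    | some j => 7 + j
    | none => 14

-- unfolding equations
theorem amO_cons_none {g : String → Option Nat} {x : String} {xs : List String}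
    (h : amO g xs = none) :
    amO g (x :: xs) = if (g x).isSome then some x else none := by simp [amO, h]

theorem amO_cons_some {g : String → Option Nat} {x : String} {xs : List String} {b : String}
    (h : amO g xs = some b) :
    amO g (x :: xs) = if oLt (g b) (g x) then some b else some x := by simp [amO, h]

theorem amT_cons_none {k : String → Nat} {x : String} {xs : List String}
    (h : amT k xs = none) : amT k (x :: xs) = some x := by simp [amT, h]

theorem amT_cons_some {k : String → Nat} {x : String} {xs : List String} {c : String}
    (h : amT k xs = some c) :
    amT k (x :: xs) = if k c < k x then some c else some x := by simp [amT, h]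

-- ---------- dict built by A = first-occurrence dedup of the headers, paired with norms ----------

theorem dict_items_fold (hs : List String) :
    ∀ (d : PySem.Dict String String) (s : List String),
      d.items = s.map (fun h => (h, pyNorm h)) →
      (hs.foldl (fun d h => d.insert h (pyNorm h)) d).items
        = (hs.foldl PySem.Set.add s).map (fun h => (h, pyNorm h)) := by
  induction hs with
  | nil => intro d s h; simpa using h
  | cons x xs ih =>
    intro d s h
    simp only [List.foldl_cons]
    have hkeys : d.keys = s := by
      simp only [PySem.Dict.keys, h, List.map_map]
      have hid : ((fun x : String × String => x.1) ∘ fun h : String => (h, pyNorm h))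
          = (id : String → String) := rfl
      rw [hid, List.map_id]
    by_cases hx : x ∈ s
    · have hc : d.contains x = true := by
        rw [PySem.Dict.contains_eq_decide_mem_keys, hkeys]; simp [hx]
      have hadd : PySem.Set.add s x = s := by simp [PySem.Set.add, hx]
      rw [hadd]
      apply ih
      rw [PySem.Dict.items_insert_of_contains d _ hc, h, List.map_map]
      apply List.map_congr_left
      intro a _
      by_cases hax : a = x
      · subst hax; simp
      · simp [Function.comp, hax]
    · have hc : d.contains x = false := by
        rw [PySem.Dict.contains_eq_decide_mem_keys, hkeys]; simp [hx]
      have hadd : PySem.Set.add s x = s ++ [x] := by simp [PySem.Set.add, hx]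
      rw [hadd]
      apply ih
      rw [PySem.Dict.items_insert_of_not_contains d _ hc, h]
      simp

-- ---------- find? through the dedup fold ----------

theorem find?_append_step (q : String → Bool) (x : String) (hqx : q x = false) :
    ∀ (xs s : List String),
      xs.find? (fun a => !decide (a ∈ s ++ [x]) && q a)
        = xs.find? (fun a => !decide (a ∈ s) && q a) := by
  intro xs
  induction xs with
  | nil => intro s; rfl
  | cons y ys ih =>
    intro s
    by_cases hy : y ∈ s
    · rw [List.find?_cons_of_neg (by simp [hy]), List.find?_cons_of_neg (by simp [hy]), ih]
    · by_cases hyx : y = x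
      · subst hyx
        rw [List.find?_cons_of_neg (by simp [hqx]), List.find?_cons_of_neg (by simp [hqx]), ih]
      · cases hqy : q y with
        | true =>
          rw [List.find?_cons_of_pos (by simp [hy, hyx, hqy]),
            List.find?_cons_of_pos (by simp [hy, hqy])]
        | false =>
          rw [List.find?_cons_of_neg (by simp [hqy]), List.find?_cons_of_neg (by simp [hqy]), ih]

theorem find?_foldl_add (q : String → Bool) :
    ∀ (xs s : List String),
      (xs.foldl PySem.Set.add s).find? q
        = (s.find? q).or (xs.find? (fun a => !decide (a ∈ s) && q a)) := by
  intro xs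
  induction xs with
  | nil => intro s; simp
  | cons x xs ih =>
    intro s
    simp only [List.foldl_cons]
    by_cases hx : x ∈ s
    · have hadd : PySem.Set.add s x = s := by simp [PySem.Set.add, hx]
      rw [hadd, ih, List.find?_cons_of_neg (by simp [hx])]
    · have hadd : PySem.Set.add s x = s ++ [x] := by simp [PySem.Set.add, hx]
      rw [hadd, ih, List.find?_append, Option.or_assoc]
      congr 1
      cases hqx : q x with
      | true =>
        rw [List.find?_cons_of_pos (p := fun a => !decide (a ∈ s) && q a) (by simp [hx, hqx]),
          List.find?_cons_of_pos (p := q) hqx]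
        rw [Option.some_or]
      | false =>
        rw [List.find?_cons_of_neg (p := fun a => !decide (a ∈ s) && q a) (by simp [hqx]),
          List.find?_cons_of_neg (p := q) (by simp [hqx])]
        rw [List.find?_nil, Option.none_or]
        exact find?_append_step q x hqx xs s

theorem find?_dedup (q : String → Bool) (hs : List String) :
    (hs.foldl PySem.Set.add []).find? q = hs.find? q := by
  rw [find?_foldl_add]
  simp

-- ---------- leftmost-argmin lemmas ----------

theorem amO_of_all_none (g : String → Option Nat) :
    ∀ hs : List String, (∀ x ∈ hs, g x = none) → amO g hs = none := by
  intro hs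
  induction hs with
  | nil => intro _; rfl
  | cons x xs ih =>
    intro h
    have hx : g x = none := h x (by simp)
    have ht : amO g xs = none := ih (fun y hy => h y (by simp [hy]))
    rw [amO_cons_none ht, hx]
    simp

theorem amO_none_forall (g : String → Option Nat) :
    ∀ hs : List String, amO g hs = none → ∀ x ∈ hs, g x = none := by
  intro hs
  induction hs with
  | nil => intro _ x hx; simp at hx
  | cons x xs ih =>
    intro h y hy
    cases ht : amO g xs with
    | some b =>
      rw [amO_cons_some ht] at h
      split at h <;> simp_all
    | none =>
      rw [amO_cons_none ht] at h
      have hx : g x = none := by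
        by_cases hgx : (g x).isSome
        · rw [if_pos hgx] at h; cases h
        · exact Option.not_isSome_iff_eq_none.mp hgx
      rcases List.mem_cons.mp hy with rfl | hy'
      · exact hx
      · exact ih ht y hy'

theorem amO_mem (g : String → Option Nat) :
    ∀ (hs : List String) (b : String), amO g hs = some b → b ∈ hs := by
  intro hs
  induction hs with
  | nil => intro b h; simp [amO] at h
  | cons x xs ih =>
    intro b h
    cases ht : amO g xs with
    | none =>
      rw [amO_cons_none ht] at h
      split at h
      · injection h with h2; exact h2 ▸ List.mem_cons_self
      · cases h
    | some b' =>
      rw [amO_cons_some ht] at h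
      split at h
      · injection h with h2; exact List.mem_cons_of_mem x (h2 ▸ ih b' ht)
      · injection h with h2; exact h2 ▸ List.mem_cons_self

theorem amO_some_isSome (g : String → Option Nat) :
    ∀ (hs : List String) (b : String), amO g hs = some b → (g b).isSome = true := by
  intro hs
  induction hs with
  | nil => intro b h; simp [amO] at h
  | cons x xs ih =>
    intro b h
    cases ht : amO g xs with
    | none =>
      rw [amO_cons_none ht] at h
      split at h
      · rename_i hgx; injection h with h2; exact h2 ▸ hgx
      · cases h
    | some b' =>
      rw [amO_cons_some ht] at h
      split at h
      · injection h with h2; exact h2 ▸ ih b' ht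
      · rename_i holt
        injection h with h2
        have hb' := ih b' ht
        cases hgb' : g b' with
        | none => rw [hgb'] at hb'; simp at hb'
        | some a =>
          cases hgx : g x with
          | some a' => rw [← h2, hgx]; rfl
          | none => rw [hgb', hgx] at holt; simp [oLt] at holt

theorem amO_shift (g g' : String → Option Nat) :
    ∀ hs : List String, (∀ x ∈ hs, g x = (g' x).map (· + 1)) → amO g hs = amO g' hs := by
  intro hs
  induction hs with
  | nil => intro _; rfl
  | cons x xs ih =>
    intro h
    have ht : amO g xs = amO g' xs := ih (fun y hy => h y (by simp [hy]))
    cases hx : amO g' xs with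
    | none =>
      rw [amO_cons_none (ht.trans hx), amO_cons_none hx, h x (by simp)]
      cases g' x <;> simp
    | some b =>
      rw [amO_cons_some (ht.trans hx), amO_cons_some hx,
        h b (by simp [amO_mem g' xs b hx]), h x (by simp)]
      cases g' b <;> cases g' x <;> simp [oLt]

theorem fIdx_cons (p : String → String → Bool) (c : String) (cs : List String) (y : String) :
    fIdx p (c :: cs) y = if p c y then some 0 else (fIdx p cs y).map (· + 1) := by
  simp [fIdx, List.findIdx?_cons]

theorem amO_find_head (p : String → String → Bool) (c : String) (cs : List String) :
    ∀ (hs : List String) (x0 : String), hs.find? (fun x => p c x) = some x0 →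
      amO (fIdx p (c :: cs)) hs = some x0 := by
  intro hs
  induction hs with
  | nil => intro x0 h; simp at h
  | cons h t ih =>
    intro x0 hf
    cases hpc : p c h with
    | true =>
      rw [List.find?_cons_of_pos (by simp [hpc])] at hf
      injection hf with hf
      subst hf
      cases ht : amO (fIdx p (c :: cs)) t with
      | none =>
        rw [amO_cons_none ht, if_pos (by rw [fIdx_cons, if_pos hpc]; rfl)]
      | some b =>
        have hfalse : oLt (fIdx p (c :: cs) b) (fIdx p (c :: cs) h) = false := by
          rw [fIdx_cons p c cs h, if_pos hpc]
          cases fIdx p (c :: cs) b <;> simp [oLt]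
        rw [amO_cons_some ht, hfalse]
        simp
    | false =>
      rw [List.find?_cons_of_neg (by simp [hpc])] at hf
      have hih := ih x0 hf
      have hx0 : p c x0 = true := by simpa using List.find?_some hf
      have htrue : oLt (fIdx p (c :: cs) x0) (fIdx p (c :: cs) h) = true := by
        rw [fIdx_cons p c cs x0, fIdx_cons p c cs h, if_pos hx0, if_neg (by simp [hpc])]
        cases fIdx p cs h <;> simp [oLt]
      rw [amO_cons_some hih, htrue]
      simp

theorem findSome_eq_amO (p : String → String → Bool) :
    ∀ (cs hs : List String),
      List.findSome? (fun c => hs.find? (fun x => p c x)) cs = amO (fIdx p cs) hs := by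
  intro cs
  induction cs with
  | nil =>
    intro hs
    rw [amO_of_all_none _ hs (fun x _ => by simp [fIdx])]
    simp
  | cons c cs ih =>
    intro hs
    cases hf : hs.find? (fun x => p c x) with
    | some x0 =>
      simp only [List.findSome?_cons, hf]
      exact (amO_find_head p c cs hs x0 hf).symm
    | none =>
      have hnone : ∀ x ∈ hs, p c x = false := by
        intro x hx
        have := List.find?_eq_none.mp hf x hx
        simpa using this
      simp only [List.findSome?_cons, hf]
      rw [ih hs]
      exact (amO_shift (fIdx p (c :: cs)) (fIdx p cs) hs
        (fun x hx => by rw [fIdx_cons, if_neg (by simp [hnone x hx])])).symm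

-- ---------- characterization of B's rank ----------

theorem rankGo_nil (normed : String) (j : Nat) (cont : Option (Nat × Nat)) :
    rankGo normed j cont [] = cont.getD (2, 0) := by simp [rankGo]

theorem rankGo_cons (normed : String) (j : Nat) (cont : Option (Nat × Nat))
    (c : String) (cs : List String) :
    rankGo normed j cont (c :: cs) =
      if normed == c then (0, j)
      else rankGo normed (j + 1)
        (if cont.isNone && containsToks c normed then some (1, j) else cont) cs := by
  simp [rankGo]

theorem rankGo_spec (normed : String) :
    ∀ (cs : List String) (j : Nat) (cont : Option (Nat × Nat)),
      rankGo normed j cont cs =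
        (match List.findIdx? (fun c => normed == c) cs with
         | some i => (0, j + i)
         | none =>
           cont.getD
             (match List.findIdx? (fun c => containsToks c normed) cs with
              | some i => (1, j + i)
              | none => (2, 0))) := by
  intro cs
  induction cs with
  | nil => intro j cont; simp [rankGo_nil]
  | cons c cs ih =>
    intro j cont
    rw [rankGo_cons]
    cases he : (normed == c) with
    | true =>
      rw [if_pos rfl]
      simp [List.findIdx?_cons, he]
    | false =>
      rw [if_neg (by simp), ih]
      rw [show List.findIdx? (fun c' => normed == c') (c :: cs)
          = (List.findIdx? (fun c' => normed == c') cs).map (· + 1) from by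
        simp [List.findIdx?_cons, he]]
      rw [show List.findIdx? (fun c' => containsToks c' normed) (c :: cs)
          = (if containsToks c normed then some 0
             else (List.findIdx? (fun c' => containsToks c' normed) cs).map (· + 1)) from by
        simp [List.findIdx?_cons]]
      cases hfE : List.findIdx? (fun c' => normed == c') cs with
      | some i => simp <;> omega
      | none =>
        cases cont with
        | some pr => simp
        | none =>
          cases hcC : containsToks c normed with
          | true => simp
          | false =>
            cases hfC : List.findIdx? (fun c' => containsToks c' normed) cs with
            | some i => simp <;> omega
            | none => simp

theorem rank_eq (x : String) :
    rankOf cands x =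
      (match fIdx pExact cands x with
       | some j => (0, j)
       | none =>
         match fIdx pCont cands x with
         | some j => (1, j)
         | none => (2, 0)) := by
  have h1 : fIdx pExact cands x = List.findIdx? (fun c => pyNorm x == c) cands := rfl
  have h2 : fIdx pCont cands x = List.findIdx? (fun c => containsToks c (pyNorm x)) cands := rfl
  unfold rankOf
  rw [rankGo_spec, h1, h2]
  cases hfE : List.findIdx? (fun c => pyNorm x == c) cands with
  | some i => simp
  | none =>
    cases hfC : List.findIdx? (fun c => containsToks c (pyNorm x)) cands with
    | some i => simp
    | none => simp

theorem cands_len : cands.length = 7 := by simp [cands, nameCandidates]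

theorem fIdx_lt (p : String → String → Bool) (x : String) (j : Nat) :
    fIdx p cands x = some j → j < 7 := by
  intro h
  have := (List.findIdx?_eq_some_iff_findIdx_eq.mp h).1
  rwa [cands_len] at this

-- clean equations for kOf
theorem kOf_exact {x : String} {j : Nat} (hj : fIdx pExact cands x = some j) : kOf x = j := by
  unfold kOf; simp [hj]

theorem kOf_cont {x : String} {j : Nat} (hE : fIdx pExact cands x = none)
    (hC : fIdx pCont cands x = some j) : kOf x = 7 + j := by
  unfold kOf; simp [hE, hC]

theorem kOf_no_match {x : String} (hE : fIdx pExact cands x = none)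
    (hC : fIdx pCont cands x = none) : kOf x = 14 := by
  unfold kOf; simp [hE, hC]

theorem kOf_noexact_ge {x : String} (hE : fIdx pExact cands x = none) : 7 ≤ kOf x := by
  unfold kOf
  simp only [hE]
  cases hC : fIdx pCont cands x with
  | some j => simp
  | none => simp

theorem pairLt_k (x y : String) :
    pairLt (rankOf cands x) (rankOf cands y) = decide (kOf x < kOf y) := by
  rw [rank_eq x, rank_eq y]
  cases hEx : fIdx pExact cands x with
  | some jx =>
    have hjx := fIdx_lt _ _ _ hEx
    have hkx := kOf_exact hEx
    cases hEy : fIdx pExact cands y with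
    | some jy =>
      have hky := kOf_exact hEy
      simp [pairLt, hkx, hky]
    | none =>
      have hky := kOf_noexact_ge hEy
      simp only [pairLt]
      cases hCy : fIdx pCont cands y with
      | some jy =>
        have hky2 := kOf_cont hEy hCy
        simp [hkx, hky2] <;> omega
      | none =>
        have hky2 := kOf_no_match hEy hCy
        simp [hkx, hky2] <;> omega
  | none =>
    have hkx7 := kOf_noexact_ge hEx
    cases hEy : fIdx pExact cands y with
    | some jy =>
      have hjy := fIdx_lt _ _ _ hEy
      have hky := kOf_exact hEy
      cases hCx : fIdx pCont cands x with
      | some jx =>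
        have hkx := kOf_cont hEx hCx
        simp [pairLt, hkx, hky] <;> omega
      | none =>
        have hkx := kOf_no_match hEx hCx
        simp [pairLt, hkx, hky] <;> omega
    | none =>
      cases hCx : fIdx pCont cands x with
      | some jx =>
        have hjx := fIdx_lt _ _ _ hCx
        have hkx := kOf_cont hEx hCx
        cases hCy : fIdx pCont cands y with
        | some jy =>
          have hky := kOf_cont hEy hCy
          simp [pairLt, hkx, hky]
        | none =>
          have hky := kOf_no_match hEy hCy
          simp [pairLt, hkx, hky] <;> omega
      | none =>
        have hkx := kOf_no_match hEx hCx
        cases hCy : fIdx pCont cands y with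
        | some jy =>
          have hjy := fIdx_lt _ _ _ hCy
          have hky := kOf_cont hEy hCy
          simp [pairLt, hkx, hky] <;> omega
        | none =>
          have hky := kOf_no_match hEy hCy
          simp [pairLt, hkx, hky]

-- ---------- B's fold = leftmost argmin of kOf ----------

def stepB (best : Option ((Nat × Nat) × String)) (h : String) : Option ((Nat × Nat) × String) :=
  match best with
  | none => some (rankOf cands h, h)
  | some b => if pairLt (rankOf cands h) b.1 then some (rankOf cands h, h) else some b

def chooseL : List String → String → String
  | [], b => b
  | x :: xs, b => chooseL xs (if pairLt (rankOf cands x) (rankOf cands b) then x else b)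

theorem chooseL_cons (b x : String) (xs : List String) :
    chooseL (x :: xs) b
      = chooseL xs (if pairLt (rankOf cands x) (rankOf cands b) then x else b) := rfl

theorem foldl_stepB :
    ∀ (xs : List String) (b : String),
      xs.foldl stepB (some (rankOf cands b, b))
        = some (rankOf cands (chooseL xs b), chooseL xs b) := by
  intro xs
  induction xs with
  | nil => intro b; rfl
  | cons x xs ih =>
    intro b
    rw [List.foldl_cons, chooseL_cons]
    have hstep : stepB (some (rankOf cands b, b)) x
        = some (rankOf cands (if pairLt (rankOf cands x) (rankOf cands b) then x else b),
            (if pairLt (rankOf cands x) (rankOf cands b) then x else b)) := by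
      by_cases hp : pairLt (rankOf cands x) (rankOf cands b) = true
      · simp [stepB, hp]
      · simp [stepB, hp]
    rw [hstep, ih]

theorem amT_mem (k : String → Nat) :
    ∀ (hs : List String) (c : String), amT k hs = some c → c ∈ hs := by
  intro hs
  induction hs with
  | nil => intro c h; simp [amT] at h
  | cons x xs ih =>
    intro c h
    cases ht : amT k xs with
    | none =>
      rw [amT_cons_none ht] at h
      injection h with h2; exact h2 ▸ List.mem_cons_self
    | some c' =>
      rw [amT_cons_some ht] at h
      split at h
      · injection h with h2; exact List.mem_cons_of_mem x (h2 ▸ ih c' ht)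
      · injection h with h2; exact h2 ▸ List.mem_cons_self

theorem chooseL_amT :
    ∀ (xs : List String) (b : String), amT kOf (b :: xs) = some (chooseL xs b) := by
  intro xs
  induction xs with
  | nil => intro b; rfl
  | cons x xs ih =>
    intro b
    have hb' : chooseL (x :: xs) b = chooseL xs (if kOf x < kOf b then x else b) := by
      rw [chooseL_cons, pairLt_k]
      by_cases h : kOf x < kOf b
      · rw [if_pos (by simp [h]), if_pos h]
      · rw [if_neg (by simp [h]), if_neg h]
    rw [hb', ← ih (if kOf x < kOf b then x else b)]
    cases hxs : amT kOf xs with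
    | none =>
      have h1 : amT kOf (x :: xs) = some x := amT_cons_none hxs
      rw [amT_cons_some h1, amT_cons_none (xs := xs) hxs]
      by_cases h : kOf x < kOf b
      · rw [if_pos h, if_pos h]
      · rw [if_neg h, if_neg h]
    | some c =>
      by_cases h1 : kOf c < kOf x
      · have hxxs : amT kOf (x :: xs) = some c := by
          rw [amT_cons_some hxs, if_pos h1]
        rw [amT_cons_some hxxs]
        by_cases h2 : kOf x < kOf b
        · rw [if_pos h2, amT_cons_some hxs, if_pos h1, if_pos (by omega)]
        · rw [if_neg h2, amT_cons_some hxs]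
      · have hxxs : amT kOf (x :: xs) = some x := by
          rw [amT_cons_some hxs, if_neg h1]
        rw [amT_cons_some hxxs]
        by_cases h2 : kOf x < kOf b
        · rw [if_pos h2, if_pos h2, amT_cons_some hxs, if_neg h1]
        · rw [if_neg h2, if_neg h2, amT_cons_some hxs, if_neg (by omega)]

theorem alt_eq (hs : List String) :
    detect_name_column_py_alt hs = (hs.foldl stepB none).map (fun b => b.2) := by
  have hf : (fun (best : Option ((Nat × Nat) × String)) (h : String) =>
      match best with
      | none => some (rankOf (nameCandidates.map pyNorm) h, h)
      | some b =>
        if pairLt (rankOf (nameCandidates.map pyNorm) h) b.1 then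
          some (rankOf (nameCandidates.map pyNorm) h, h)
        else some b) = stepB := by
    funext best h
    cases best <;> rfl
  simp only [detect_name_column_py_alt]
  rw [hf]

theorem B_eq_amT (hs : List String) :
    detect_name_column_py_alt hs = amT kOf hs := by
  rw [alt_eq]
  cases hs with
  | nil => rfl
  | cons h t =>
    rw [show (h :: t).foldl stepB none = t.foldl stepB (some (rankOf cands h, h)) from rfl]
    rw [foldl_stepB t h, chooseL_amT t h]
    rfl

-- ---------- phase results transfer to the argmin of kOf ----------

theorem amO_amT (g : String → Option Nat) (off : Nat) :
    ∀ hs : List String,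
      (∀ x ∈ hs, (∀ j, g x = some j → kOf x = off + j ∧ j < 7) ∧ (g x = none → off + 7 ≤ kOf x)) →
      ∀ b, amO g hs = some b → amT kOf hs = some b := by
  intro hs
  induction hs with
  | nil => intro _ b h; simp [amO] at h
  | cons x xs ih =>
    intro hk b hb
    cases hx : amO g xs with
    | some b' =>
      rw [amO_cons_some hx] at hb
      have hb'mem := amO_mem g xs b' hx
      have hb'some := amO_some_isSome g xs b' hx
      obtain ⟨j', hj'⟩ := Option.isSome_iff_exists.mp hb'some
      have hkb' := (hk b' (List.mem_cons_of_mem x hb'mem)).1 j' hj'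
      have hih : amT kOf xs = some b' :=
        ih (fun y hy => hk y (List.mem_cons_of_mem x hy)) b' hx
      rw [amT_cons_some hih]
      have hcond : oLt (g b') (g x) = decide (kOf b' < kOf x) := by
        rw [hj']
        cases hgx : g x with
        | some jj =>
          have hkx := (hk x List.mem_cons_self).1 jj hgx
          simp [oLt, hkb'.1, hkx.1]
        | none =>
          have hge := (hk x List.mem_cons_self).2 hgx
          have hlt : kOf b' < kOf x := by omega
          simp [oLt, hlt]
      rw [hcond] at hb
      by_cases hlt : kOf b' < kOf x
      · rw [if_pos (by simp [hlt])] at hb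
        rw [if_pos hlt]
        exact hb
      · rw [if_neg (by simp [hlt])] at hb
        rw [if_neg hlt]
        exact hb
    | none =>
      rw [amO_cons_none hx] at hb
      have hxall := amO_none_forall g xs hx
      by_cases hgx' : (g x).isSome
      · rw [if_pos hgx'] at hb
        injection hb with hb
        subst hb
        obtain ⟨jx, hjx⟩ := Option.isSome_iff_exists.mp hgx'
        have hkx := (hk x List.mem_cons_self).1 jx hjx
        cases hxs : amT kOf xs with
        | none => rw [amT_cons_none hxs]
        | some c =>
          have hcmem := amT_mem kOf xs c hxs
          have hkc := (hk c (List.mem_cons_of_mem x hcmem)).2 (hxall c hcmem)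
          rw [amT_cons_some hxs, if_neg (by omega)]
      · rw [if_neg hgx'] at hb
        cases hb

theorem amT_all_max :
    ∀ hs : List String, (∀ x ∈ hs, kOf x = 14) → amT kOf hs = hs.head? := by
  intro hs
  induction hs with
  | nil => intro _; rfl
  | cons x xs ih =>
    intro h
    cases hxs : amT kOf xs with
    | none => rw [amT_cons_none hxs]; rfl
    | some c =>
      have hc := h c (List.mem_cons_of_mem x (amT_mem kOf xs c hxs))
      have hx := h x List.mem_cons_self
      rw [amT_cons_some hxs, if_neg (by omega)]
      rfl

-- ---------- A reduces to the same argmin structure ----------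

theorem A_eq_phases (hs : List String) :
    detect_name_column_py hs =
      (match amO (fIdx pExact cands) hs with
       | some r => some r
       | none =>
         match amO (fIdx pCont cands) hs with
         | some r => some r
         | none => hs.head?) := by
  have hitems : (hs.foldl (fun d h => d.insert h (pyNorm h)) PySem.Dict.empty).items
      = (hs.foldl PySem.Set.add []).map (fun h => (h, pyNorm h)) := by
    apply dict_items_fold
    rfl
  have hfind : ∀ q : String × String → Bool,
      (((hs.foldl (fun d h => d.insert h (pyNorm h)) PySem.Dict.empty).items.find? q).map
          (fun p => p.1))
        = hs.find? (fun x => q (x, pyNorm x)) := by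
    intro q
    rw [hitems, List.find?_map, Option.map_map, find?_dedup]
    have hcomp : ((fun p : String × String => p.1) ∘ (fun h => (h, pyNorm h)))
        = (id : String → String) := rfl
    have hpred : (q ∘ fun h => (h, pyNorm h)) = (fun x => q (x, pyNorm x)) := rfl
    rw [hcomp, hpred]
    simp
  have hE := findSome_eq_amO pExact cands hs
  have hC := findSome_eq_amO pCont cands hs
  rw [show (fun c => hs.find? fun x => pExact c x)
      = (fun c => hs.find? fun x => pyNorm x == c) from rfl] at hE
  rw [show (fun c => hs.find? fun x => pCont c x)
      = (fun c => hs.find? fun x => containsToks c (pyNorm x)) from rfl] at hC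
  simp only [detect_name_column_py]
  rw [show (nameCandidates.map pyNorm) = cands from rfl]
  simp only [hfind]
  rw [hE, hC]

theorem main_equiv (hs : List String) :
    detect_name_column_py hs = detect_name_column_py_alt hs := by
  rw [A_eq_phases, B_eq_amT]
  cases hEa : amO (fIdx pExact cands) hs with
  | some b =>
    have hk : ∀ x ∈ hs,
        (∀ j, fIdx pExact cands x = some j → kOf x = 0 + j ∧ j < 7) ∧
        (fIdx pExact cands x = none → 0 + 7 ≤ kOf x) := by
      intro x _
      refine ⟨fun j hj => ⟨?_, fIdx_lt _ _ _ hj⟩, fun hj => ?_⟩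
      · have := kOf_exact hj; omega
      · have := kOf_noexact_ge hj; omega
    rw [amO_amT _ 0 hs hk b hEa]
  | none =>
    have hEnone := amO_none_forall _ hs hEa
    cases hCa : amO (fIdx pCont cands) hs with
    | some b =>
      have hk : ∀ x ∈ hs,
          (∀ j, fIdx pCont cands x = some j → kOf x = 7 + j ∧ j < 7) ∧
          (fIdx pCont cands x = none → 7 + 7 ≤ kOf x) := by
        intro x hx
        refine ⟨fun j hj => ⟨?_, fIdx_lt _ _ _ hj⟩, fun hj => ?_⟩
        · have := kOf_cont (hEnone x hx) hj; omega
        · have := kOf_no_match (hEnone x hx) hj; omega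
      rw [amO_amT _ 7 hs hk b hCa]
    | none =>
      have hCnone := amO_none_forall _ hs hCa
      rw [amT_all_max hs (fun x hx => kOf_no_match (hEnone x hx) (hCnone x hx))]

-- ===== VERDICT (by name: the statement is the Claim_ definition above) =====
theorem detect_name_column_py_spec : Claim_equal_detect_name_column_py := by
  intro headers _
  unfold Spec_detect_name_column_py
  exact main_equiv headers
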